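-- pv_equiv track=rewrite | github.com/rafael-keil/Python-introducao | testes/Hogwarts.py | chapeuSeletor
-- ===== SOURCE A (Python) =====
-- def chapeuSeletor(nome):
--     for i in nome:
--         if(i == "g"):
--             return("Grifinória")
--         elif(i == "s"):
--             return("Soncerina")
--         elif(i == "c"):
--             return("Corvinal")
--         elif(i == "l"):
--             return("Lufa-Lufa")
--
--     return("Grifinória")
-- ===== SOURCE B (Python) =====
-- def chapeuSeletor(nome):
--     # Four independent find() scans combined by index minimization,
--     # instead of A's single early-exit character loop.
--     n = len(nome)
--     pg = nome.find("g")
--     ps = nome.find("s")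
--     pc = nome.find("c")
--     pl = nome.find("l")
--     if pg == -1:
--         pg = n
--     if ps == -1:
--         ps = n
--     if pc == -1:
--         pc = n
--     if pl == -1:
--         pl = n
--     if pg <= ps and pg <= pc and pg <= pl:
--         return "Grifinória"
--     if ps <= pc and ps <= pl:
--         return "Soncerina"
--     if pc <= pl:
--         return "Corvinal"
--     return "Lufa-Lufa"
-- ===== Notes on version B (the rewrite author's own statement) =====
-- stated objective: alternative
-- what changed: Replaced the early-exit per-character scan with four independent str.find scans (absence mapped to len(nome)) combined by index minimization, whose first-house default coincides with the no-marker case.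
import Mathlib
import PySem

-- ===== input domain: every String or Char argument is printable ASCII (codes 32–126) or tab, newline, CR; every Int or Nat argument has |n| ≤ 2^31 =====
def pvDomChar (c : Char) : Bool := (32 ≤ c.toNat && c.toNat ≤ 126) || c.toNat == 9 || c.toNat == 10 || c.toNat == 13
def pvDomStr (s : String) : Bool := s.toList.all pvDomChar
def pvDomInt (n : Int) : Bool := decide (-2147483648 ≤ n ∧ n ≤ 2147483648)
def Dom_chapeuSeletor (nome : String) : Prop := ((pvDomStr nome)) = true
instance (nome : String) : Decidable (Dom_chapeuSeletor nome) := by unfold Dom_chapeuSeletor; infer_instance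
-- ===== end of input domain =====

-- B replaces A's early-exit character scan by four independent find() scans combined by index minimization (alternative decomposition, same cost).


-- ===== PORT A =====
def chapeuSeletorLoop : List Char → String
  | [] => "Grifinória"
  | i :: resto =>
    if i = 'g' then "Grifinória"
    else if i = 's' then "Soncerina"
    else if i = 'c' then "Corvinal"
    else if i = 'l' then "Lufa-Lufa"
    else chapeuSeletorLoop resto

def chapeuSeletor (nome : String) : String := chapeuSeletorLoop nome.toList

-- ===== PORT B =====
def chapeuSeletor_alt (nome : String) : String :=
  let n : Int := PySem.Str.len nome
  let pg0 := PySem.Str.find nome "g"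
  let pg := if pg0 = -1 then n else pg0
  let ps0 := PySem.Str.find nome "s"
  let ps := if ps0 = -1 then n else ps0
  let pc0 := PySem.Str.find nome "c"
  let pc := if pc0 = -1 then n else pc0
  let pl0 := PySem.Str.find nome "l"
  let pl := if pl0 = -1 then n else pl0
  if pg ≤ ps ∧ pg ≤ pc ∧ pg ≤ pl then "Grifinória"
  else if ps ≤ pc ∧ ps ≤ pl then "Soncerina"
  else if pc ≤ pl then "Corvinal"
  else "Lufa-Lufa"

-- ===== PRECONDITION & SPEC =====
def Spec_chapeuSeletor (nome : String) (out : String) : Prop := out = chapeuSeletor_alt nome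
instance (nome : String) (out : String) : Decidable (Spec_chapeuSeletor nome out) := by unfold Spec_chapeuSeletor; infer_instance

-- ===== CLAIM (what is proved, stated in full; the proofs are below) =====
def Claim_equal_chapeuSeletor : Prop := ∀ (nome : String), Dom_chapeuSeletor nome → Spec_chapeuSeletor nome (chapeuSeletor nome)

-- ===== LEMMAS AND PROOFS =====

/-- `find` position of single char `c`, with "absent" normalised to the length. -/
def normFind (s : List Char) (c : Char) : Int :=
  if PySem.Chars.find s [c] = -1 then (s.length : Int) else PySem.Chars.find s [c]

def altChars (s : List Char) : String :=
  if normFind s 'g' ≤ normFind s 's' ∧ normFind s 'g' ≤ normFind s 'c' ∧ normFind s 'g' ≤ normFind s 'l' then "Grifinória"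
  else if normFind s 's' ≤ normFind s 'c' ∧ normFind s 's' ≤ normFind s 'l' then "Soncerina"
  else if normFind s 'c' ≤ normFind s 'l' then "Corvinal"
  else "Lufa-Lufa"

theorem alt_eq_altChars (nome : String) : chapeuSeletor_alt nome = altChars nome.toList := by
  simp [chapeuSeletor_alt, altChars, normFind, PySem.Str.find_eq, PySem.Str.len_eq]

theorem go_shift (sub : List Char) (hsub : sub ≠ []) (s : List Char) (k : Nat) :
    PySem.Chars.find.go sub s k =
      if PySem.Chars.find.go sub s 0 = -1 then -1 else PySem.Chars.find.go sub s 0 + k := by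
  induction s generalizing k with
  | nil =>
      simp [PySem.Chars.find.go, List.isEmpty_iff, hsub]
  | cons h t ih =>
      by_cases hp : sub.isPrefixOf (h :: t)
      · simp [PySem.Chars.find.go, hp]
      · rw [show PySem.Chars.find.go sub (h :: t) k = PySem.Chars.find.go sub t (k + 1) by
            simp [PySem.Chars.find.go, hp],
          show PySem.Chars.find.go sub (h :: t) 0 = PySem.Chars.find.go sub t 1 by
            simp [PySem.Chars.find.go, hp]]
        rw [ih (k + 1), ih 1]
        have hge : -1 ≤ PySem.Chars.find.go sub t 0 := PySem.Chars.neg_one_le_find t sub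
        by_cases hg : PySem.Chars.find.go sub t 0 = -1
        · simp [hg]
        · rw [if_neg hg, if_neg (by omega), if_neg hg]
          push_cast
          ring

theorem find_nil (c : Char) : PySem.Chars.find [] [c] = -1 := by
  simp [PySem.Chars.find, PySem.Chars.find.go]

theorem find_cons (h c : Char) (t : List Char) :
    PySem.Chars.find (h :: t) [c] =
      if h = c then 0
      else if PySem.Chars.find t [c] = -1 then -1 else PySem.Chars.find t [c] + 1 := by
  by_cases hc : h = c
  · subst hc
    simp [PySem.Chars.find, PySem.Chars.find.go, List.isPrefixOf]
  · rw [if_neg hc]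
    have hb : ([c].isPrefixOf (h :: t)) = false := by
      simp [List.isPrefixOf]
      intro e
      exact hc e.symm
    rw [show PySem.Chars.find (h :: t) [c] = PySem.Chars.find.go [c] t 1 by
          simp [PySem.Chars.find, PySem.Chars.find.go, hb]]
    rw [go_shift [c] (by simp) t 1]
    simp [PySem.Chars.find]

theorem normFind_nonneg (s : List Char) (c : Char) : 0 ≤ normFind s c := by
  unfold normFind
  have h1 := PySem.Chars.neg_one_le_find s [c]
  split <;> omega

theorem normFind_cons_self (c : Char) (t : List Char) : normFind (c :: t) c = 0 := by
  simp [normFind, find_cons]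

theorem normFind_cons_ne (h c : Char) (t : List Char) (hne : h ≠ c) :
    normFind (h :: t) c = normFind t c + 1 := by
  have h1 := PySem.Chars.neg_one_le_find t [c]
  unfold normFind
  rw [find_cons h c t, if_neg hne]
  by_cases hf : PySem.Chars.find t [c] = -1
  · simp [hf]
  · rw [if_neg hf, if_neg (by omega), if_neg hf]

theorem loop_eq_altChars (s : List Char) : chapeuSeletorLoop s = altChars s := by
  induction s with
  | nil =>
      simp [chapeuSeletorLoop, altChars, normFind, find_nil]
  | cons h t ih =>
      by_cases hg : h = 'g'
      · subst hg
        rw [show chapeuSeletorLoop ('g' :: t) = "Grifinória" by simp [chapeuSeletorLoop]]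
        unfold altChars
        rw [normFind_cons_self, if_pos ⟨normFind_nonneg _ _, normFind_nonneg _ _, normFind_nonneg _ _⟩]
      by_cases hs : h = 's'
      · subst hs
        have hG : normFind ('s' :: t) 'g' = normFind t 'g' + 1 := normFind_cons_ne _ _ _ (by decide)
        have hGn := normFind_nonneg t 'g'
        rw [show chapeuSeletorLoop ('s' :: t) = "Soncerina" by simp [chapeuSeletorLoop]]
        unfold altChars
        rw [hG, normFind_cons_self, if_neg (by omega), if_pos ⟨normFind_nonneg _ _, normFind_nonneg _ _⟩]
      by_cases hc : h = 'c'
      · subst hc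
        have hG : normFind ('c' :: t) 'g' = normFind t 'g' + 1 := normFind_cons_ne _ _ _ (by decide)
        have hS : normFind ('c' :: t) 's' = normFind t 's' + 1 := normFind_cons_ne _ _ _ (by decide)
        have hGn := normFind_nonneg t 'g'
        have hSn := normFind_nonneg t 's'
        rw [show chapeuSeletorLoop ('c' :: t) = "Corvinal" by simp [chapeuSeletorLoop]]
        unfold altChars
        rw [hG, hS, normFind_cons_self, if_neg (by omega), if_neg (by omega),
          if_pos (normFind_nonneg _ _)]
      by_cases hl : h = 'l'
      · subst hl
        have hG : normFind ('l' :: t) 'g' = normFind t 'g' + 1 := normFind_cons_ne _ _ _ (by decide)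
        have hS : normFind ('l' :: t) 's' = normFind t 's' + 1 := normFind_cons_ne _ _ _ (by decide)
        have hC : normFind ('l' :: t) 'c' = normFind t 'c' + 1 := normFind_cons_ne _ _ _ (by decide)
        have hGn := normFind_nonneg t 'g'
        have hSn := normFind_nonneg t 's'
        have hCn := normFind_nonneg t 'c'
        rw [show chapeuSeletorLoop ('l' :: t) = "Lufa-Lufa" by simp [chapeuSeletorLoop]]
        unfold altChars
        rw [hG, hS, hC, normFind_cons_self, if_neg (by omega), if_neg (by omega), if_neg (by omega)]
      · have h1 : normFind (h :: t) 'g' = normFind t 'g' + 1 := normFind_cons_ne _ _ _ hg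
        have h2 : normFind (h :: t) 's' = normFind t 's' + 1 := normFind_cons_ne _ _ _ hs
        have h3 : normFind (h :: t) 'c' = normFind t 'c' + 1 := normFind_cons_ne _ _ _ hc
        have h4 : normFind (h :: t) 'l' = normFind t 'l' + 1 := normFind_cons_ne _ _ _ hl
        rw [show chapeuSeletorLoop (h :: t) = chapeuSeletorLoop t by
              simp [chapeuSeletorLoop, hg, hs, hc, hl], ih]
        unfold altChars
        simp only [h1, h2, h3, h4, add_le_add_iff_right]

-- ===== VERDICT (by name: the statement is the Claim_ definition above) =====
theorem chapeuSeletor_spec : Claim_equal_chapeuSeletor := by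
  intro nome _
  unfold Spec_chapeuSeletor
  rw [alt_eq_altChars, chapeuSeletor, loop_eq_altChars]
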